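-- pv_equiv track=rewrite | github.com/barrosyan/PINNeAPPle | pinneaple_pdb/builder.py | _resolve_packs
-- ===== SOURCE A (Python) =====
-- from typing import Any, Dict, List, Optional, Tuple, Union
--
-- def _resolve_packs(packs: List[str], available: List[str], packs_dict: Dict[str, List[str]]) -> List[str]:
--     """Resolve pack names to variable list, filtered by available; preserves order."""
--     want: List[str] = []
--     for p in packs or []:
--         want += packs_dict.get(p, [])
--     want = [v for v in want if v in available]
--     seen=set(); out=[]
--     for v in want:
--         if v not in seen:
--             out.append(v); seen.add(v)
--     return out
-- ===== SOURCE B (Python) =====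
-- def _resolve_packs(packs, available, packs_dict):
--     """Resolve pack names to variable list, filtered by available; preserves order."""
--     vals = [v for p in (packs or []) for v in packs_dict.get(p, [])]
--     out = []
--     while vals:
--         head = vals[0]
--         if head in available:
--             out.append(head)
--         vals = [v for v in vals[1:] if v != head]
--     return out
-- ===== Notes on version B (the rewrite author's own statement) =====
-- stated objective: alternative
-- what changed: Replaces the seen-set dedup (A's three passes: concatenate into a want list, filter it by availability, then scan with a growing seen set) with repeated-extraction nub: repeatedly take the first value of the worklist, keep it if available, and delete all of its later occurrences from the worklist, so no seen set and no separate filter pass exist.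
import Mathlib
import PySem

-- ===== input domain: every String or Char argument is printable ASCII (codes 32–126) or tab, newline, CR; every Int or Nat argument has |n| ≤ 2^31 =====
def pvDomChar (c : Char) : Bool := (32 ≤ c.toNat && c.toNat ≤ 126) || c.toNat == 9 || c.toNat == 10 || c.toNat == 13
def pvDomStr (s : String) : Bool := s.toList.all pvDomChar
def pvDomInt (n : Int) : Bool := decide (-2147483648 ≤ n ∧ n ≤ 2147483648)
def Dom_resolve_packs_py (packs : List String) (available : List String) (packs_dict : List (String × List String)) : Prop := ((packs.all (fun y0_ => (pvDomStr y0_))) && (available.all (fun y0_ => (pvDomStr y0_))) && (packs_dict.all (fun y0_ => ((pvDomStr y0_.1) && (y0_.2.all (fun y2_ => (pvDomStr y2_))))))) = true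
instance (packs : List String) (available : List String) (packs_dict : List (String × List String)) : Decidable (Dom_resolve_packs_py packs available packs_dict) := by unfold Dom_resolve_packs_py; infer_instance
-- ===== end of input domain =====

-- B replaces A's seen-set dedup by repeated-extraction nub (take head, drop its later occurrences); same result, no seen set.


-- ===== PORT A =====
-- helper: A's dedup pass body (seen/out loop step)
def pvDedupStep (st : PySem.Set String × List String) (v : String) : PySem.Set String × List String :=
  if PySem.Set.contains st.1 v then st else (PySem.Set.add st.1 v, st.2 ++ [v])

def resolve_packs_py (packs : List String) (available : List String) (packs_dict : List (String × List String)) : List String :=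
  let want := packs.foldl (fun w p => w ++ PySem.Dict.getD (PySem.Dict.mk packs_dict) p []) ([] : List String)
  let want2 := want.filter (fun v => available.contains v)
  (want2.foldl pvDedupStep (PySem.Set.empty, [])).2

-- ===== PORT B =====
-- helper: B's while loop — repeatedly extract the head, keep it if available, delete its later occurrences
def pvNubAvail (available : List String) : List String → List String
  | [] => []
  | head :: rest =>
      let rest' := rest.filter (fun v => v ≠ head)
      if available.contains head then head :: pvNubAvail available rest'
      else pvNubAvail available rest'
termination_by vs => vs.length
decreasing_by
  all_goals
    simp only [List.length_cons]
    refine Nat.lt_succ_of_le ?_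
    simpa using List.length_filter_le (fun x : {x // x ∈ rest} => !decide (↑x = head)) rest.attach

def resolve_packs_py_alt (packs : List String) (available : List String) (packs_dict : List (String × List String)) : List String :=
  let vals := packs.flatMap (fun p => PySem.Dict.getD (PySem.Dict.mk packs_dict) p [])
  pvNubAvail available vals

-- ===== PRECONDITION & SPEC =====
def Spec_resolve_packs_py (packs : List String) (available : List String) (packs_dict : List (String × List String)) (out : List String) : Prop := out = resolve_packs_py_alt packs available packs_dict
instance (packs : List String) (available : List String) (packs_dict : List (String × List String)) (out : List String) : Decidable (Spec_resolve_packs_py packs available packs_dict out) := by unfold Spec_resolve_packs_py; infer_instance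

-- ===== CLAIM (what is proved, stated in full; the proofs are below) =====
def Claim_equal_resolve_packs_py : Prop := ∀ (packs : List String) (available : List String) (packs_dict : List (String × List String)), Dom_resolve_packs_py packs available packs_dict → Spec_resolve_packs_py packs available packs_dict (resolve_packs_py packs available packs_dict)

-- ===== LEMMAS AND PROOFS =====

-- plain repeated-extraction nub (no availability test)
def pvNub : List String → List String
  | [] => []
  | head :: rest => head :: pvNub (rest.filter (fun v => v ≠ head))
termination_by vs => vs.length
decreasing_by
  all_goals
    simp only [List.length_cons]
    refine Nat.lt_succ_of_le ?_
    simpa using List.length_filter_le (fun x : {x // x ∈ rest} => !decide (↑x = head)) rest.attach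

lemma pv_foldl_append_eq_flatMap {α β : Type} (h : α → List β) (xs : List α) (init : List β) :
    xs.foldl (fun w p => w ++ h p) init = init ++ xs.flatMap h := by
  induction xs generalizing init with
  | nil => simp
  | cons x xs ih => simp [List.flatMap_cons, ih]

-- the seen-set fold equals nub applied to the not-yet-seen elements
lemma pv_foldl_dedup_eq_nub (vs : List String) :
    ∀ (S : PySem.Set String) (acc : List String),
    (vs.foldl pvDedupStep (S, acc)).2
      = acc ++ pvNub (vs.filter (fun v => !(PySem.Set.contains S v))) := by
  induction vs with
  | nil => intro S acc; simp [pvNub]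
  | cons v vs ih =>
    intro S acc
    by_cases hv : v ∈ S
    · have hstep : pvDedupStep (S, acc) v = (S, acc) := by simp [pvDedupStep, hv]
      simp only [List.foldl_cons, hstep, List.filter_cons]
      simp [hv, ih]
    · have hstep : pvDedupStep (S, acc) v = (PySem.Set.add S v, acc ++ [v]) := by
        simp [pvDedupStep, hv]
      have hfil : vs.filter (fun w => !(PySem.Set.contains (PySem.Set.add S v) w))
          = (vs.filter (fun w => !(PySem.Set.contains S w))).filter (fun w => w ≠ v) := by
        rw [List.filter_filter]
        apply List.filter_congr
        intro w _
        by_cases hw : w = v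
        · subst hw; simp [PySem.Set.mem_add]
        · simp [PySem.Set.mem_add, hw]
      simp only [List.foldl_cons, hstep, List.filter_cons]
      rw [ih, hfil]
      simp only [show (!PySem.Set.contains S v) = true by simp [hv], if_true]
      rw [pvNub]
      simp

-- interleaving the availability test equals filtering first
lemma pv_nub_filter_eq_nubAvail (available : List String) :
    ∀ (n : Nat) (vs : List String), vs.length ≤ n →
    pvNub (vs.filter (fun v => available.contains v)) = pvNubAvail available vs := by
  intro n
  induction n with
  | zero =>
    intro vs h
    have : vs = [] := List.eq_nil_of_length_eq_zero (Nat.le_zero.mp h)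
    subst this; simp [pvNub, pvNubAvail]
  | succ n ih =>
    intro vs h
    simp only [List.contains_eq_mem] at ih ⊢
    cases vs with
    | nil => simp [pvNub, pvNubAvail]
    | cons v vs =>
      have hlen : (vs.filter (fun w => w ≠ v)).length ≤ n :=
        le_trans (List.length_filter_le _ vs) (Nat.succ_le_succ_iff.mp h)
      by_cases hav : v ∈ available
      · rw [pvNubAvail]
        simp only [List.contains_eq_mem, List.filter_cons, hav, decide_true, if_true]
        have hcomm : (vs.filter (fun w => decide (w ∈ available))).filter (fun w => decide (w ≠ v))
            = (vs.filter (fun w => decide (w ≠ v))).filter (fun w => decide (w ∈ available)) := by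
          rw [List.filter_filter, List.filter_filter]
          apply List.filter_congr
          intro w _
          exact Bool.and_comm _ _
        rw [pvNub, hcomm, ih _ hlen]
      · rw [pvNubAvail]
        have hdrop : vs.filter (fun w => decide (w ∈ available))
            = (vs.filter (fun w => decide (w ≠ v))).filter (fun w => decide (w ∈ available)) := by
          rw [List.filter_filter]
          apply List.filter_congr
          intro w _
          by_cases hwv : w = v
          · subst hwv; simpa using hav
          · simp [hwv]
        simp only [List.contains_eq_mem, List.filter_cons, hav, decide_false,
          Bool.false_eq_true, if_false]
        rw [hdrop, ih _ hlen]

-- ===== VERDICT (by name: the statement is the Claim_ definition above) =====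
theorem resolve_packs_py_spec : Claim_equal_resolve_packs_py := by
  intro packs available packs_dict _
  unfold Spec_resolve_packs_py resolve_packs_py resolve_packs_py_alt
  rw [pv_foldl_append_eq_flatMap, List.nil_append,
    pv_foldl_dedup_eq_nub _ PySem.Set.empty []]
  simp only [List.nil_append]
  rw [show (fun v => !(PySem.Set.contains PySem.Set.empty v)) = fun _ : String => true by
        funext v; simp [PySem.Set.empty, PySem.Set.contains],
      List.filter_true]
  exact pv_nub_filter_eq_nubAvail available _ _ le_rfl
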